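-- pv_equiv track=rewrite | github.com/liwushang/learn_python | startpython/python100/p007get_even_number.py | even_number
-- ===== SOURCE A (Python) =====
-- def even_number(paramsbegin, paramsend):
--     sum = 0
--     outcome = []
--     for item in range(paramsbegin, paramsend):
--         if (item % 2) == 0:
--             outcome.append(item)
--             sum += 1
--     return sum, outcome
-- ===== SOURCE B (Python) =====
-- def even_number(paramsbegin, paramsend):
--     start = paramsbegin + (paramsbegin % 2)
--     outcome = list(range(start, paramsend, 2))
--     return len(outcome), outcome
-- ===== Notes on version B (the rewrite author's own statement) =====
-- stated objective: simpler
-- what changed: Replaces the per-element parity test and append/counter loop with a closed-form strided range: compute the first even endpoint arithmetically and build the list as range(start, end, 2), returning its length.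
import Mathlib
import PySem

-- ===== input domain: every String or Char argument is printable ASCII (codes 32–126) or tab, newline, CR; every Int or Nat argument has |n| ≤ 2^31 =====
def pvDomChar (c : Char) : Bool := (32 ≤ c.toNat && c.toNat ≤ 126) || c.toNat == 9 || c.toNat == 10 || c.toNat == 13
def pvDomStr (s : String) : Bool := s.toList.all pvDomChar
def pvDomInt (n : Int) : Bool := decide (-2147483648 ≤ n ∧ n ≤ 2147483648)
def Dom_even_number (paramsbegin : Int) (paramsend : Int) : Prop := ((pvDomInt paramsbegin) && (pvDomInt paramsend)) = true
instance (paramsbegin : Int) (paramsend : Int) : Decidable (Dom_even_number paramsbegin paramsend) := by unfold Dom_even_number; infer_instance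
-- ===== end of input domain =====

-- B builds the even list as a closed-form strided range (first even endpoint, step 2)
-- instead of A's filtering loop with a counter; objective: simpler.

-- ===== PORT A =====
def even_number (paramsbegin : Int) (paramsend : Int) : Int × List Int :=
  (PySem.List.pyRange paramsbegin paramsend 1).foldl
    (fun st item =>
      if PySem.Int.mod item 2 = 0 then (st.1 + 1, st.2 ++ [item]) else st)
    (0, [])

-- ===== PORT B =====
def even_number_alt (paramsbegin : Int) (paramsend : Int) : Int × List Int :=
  let start := paramsbegin + PySem.Int.mod paramsbegin 2
  let outcome := PySem.List.pyRange start paramsend 2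
  ((outcome.length : Int), outcome)

-- ===== PRECONDITION & SPEC =====
def Spec_even_number (paramsbegin : Int) (paramsend : Int) (out : Int × List Int) : Prop := out = even_number_alt paramsbegin paramsend
instance (paramsbegin : Int) (paramsend : Int) (out : Int × List Int) : Decidable (Spec_even_number paramsbegin paramsend out) := by unfold Spec_even_number; infer_instance

-- ===== CLAIM (what is proved, stated in full; the proofs are below) =====
def Claim_equal_even_number : Prop := ∀ (paramsbegin : Int) (paramsend : Int), Dom_even_number paramsbegin paramsend → Spec_even_number paramsbegin paramsend (even_number paramsbegin paramsend)

-- ===== LEMMAS AND PROOFS =====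

theorem pyRange_two_nil {a b : Int} (h : b ≤ a) : PySem.List.pyRange a b 2 = [] := by
  rw [PySem.List.pyRange_of_pos a b (by norm_num)]
  rw [if_neg (by omega)]
  simp

theorem pyRange_two_cons {a b : Int} (h : a < b) :
    PySem.List.pyRange a b 2 = a :: PySem.List.pyRange (a + 2) b 2 := by
  rw [PySem.List.pyRange_of_pos a b (by norm_num),
      PySem.List.pyRange_of_pos (a + 2) b (by norm_num)]
  rw [if_pos h]
  have hn : ((b - a + 2 - 1) / 2).toNat
      = (if a + 2 < b then ((b - (a + 2) + 2 - 1) / 2).toNat else 0) + 1 := by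
    split_ifs with h2 <;> omega
  rw [hn, List.range_succ_eq_map]
  simp only [List.map_cons, List.map_map]
  congr 1
  · norm_num
  · apply List.map_congr_left
    intro k _
    simp [Function.comp]
    ring

theorem even_fold_inv (n : Nat) : ∀ (a b : Int), (b - a).toNat = n →
    ∀ (s : Int) (acc : List Int),
    (PySem.List.pyRange a b 1).foldl
      (fun st item =>
        if PySem.Int.mod item 2 = 0 then (st.1 + 1, st.2 ++ [item]) else st)
      (s, acc)
    = (s + ((PySem.List.pyRange (a + PySem.Int.mod a 2) b 2).length : Int),
       acc ++ PySem.List.pyRange (a + PySem.Int.mod a 2) b 2) := by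
  induction n with
  | zero =>
    intro a b hn s acc
    have hba : b ≤ a := by omega
    have hm : (0:Int) ≤ PySem.Int.mod a 2 := by
      rcases PySem.Int.mod_two_eq a with h | h <;> omega
    rw [PySem.List.pyRange_one_eq_nil hba, pyRange_two_nil (by omega)]
    simp
  | succ m ih =>
    intro a b hn s acc
    have hab : a < b := by omega
    rw [PySem.List.pyRange_one_cons hab]
    simp only [List.foldl_cons]
    have hmod : PySem.Int.mod a 2 = a % 2 :=
      PySem.Int.mod_eq_emod_of_pos (by norm_num)
    have hmod1 : PySem.Int.mod (a + 1) 2 = (a + 1) % 2 :=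
      PySem.Int.mod_eq_emod_of_pos (by norm_num)
    rcases PySem.Int.mod_two_eq a with h0 | h1
    · -- a is even: it is appended and counted
      rw [if_pos h0]
      rw [ih (a + 1) b (by omega) (s + 1) (acc ++ [a])]
      have h1' : PySem.Int.mod (a + 1) 2 = 1 := by rw [hmod1]; omega
      rw [h1', h0, add_zero]
      have h2 : a + 1 + 1 = a + 2 := by ring
      rw [h2, pyRange_two_cons hab]
      simp
      omega
    · -- a is odd: skipped
      rw [if_neg (by rw [h1]; norm_num)]
      rw [ih (a + 1) b (by omega) s acc]
      have h0' : PySem.Int.mod (a + 1) 2 = 0 := by rw [hmod1]; omega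
      rw [h0', h1]
      norm_num

-- ===== VERDICT (by name: the statement is the Claim_ definition above) =====
theorem even_number_spec : Claim_equal_even_number := by
  intro a b _
  show even_number a b = even_number_alt a b
  unfold even_number even_number_alt
  rw [even_fold_inv (b - a).toNat a b rfl 0 []]
  simp
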